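-- pv_equiv track=rewrite | github.com/akobyansamvel/psyweb | backend/api/psy_toolkit_service.py | _determine_test_type
-- ===== SOURCE A (Python) =====
-- from typing import Dict, List, Optional, Any
--
-- def _determine_test_type(test_data: Dict) -> str:
--     """Определяет тип теста на основе данных"""
--     metadata = test_data.get('metadata', {})
--     tags = metadata.get('tags', [])
--
--     # Анализируем теги и метаданные для определения типа
--     if any(tag.lower() in ['personality', 'big5', 'mbti'] for tag in tags):
--         return 'personality'
--     elif any(tag.lower() in ['cognitive', 'intelligence', 'iq'] for tag in tags):
--         return 'cognitive'
--     elif any(tag.lower() in ['clinical', 'mental_health', 'depression', 'anxiety'] for tag in tags):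
--         return 'clinical'
--     elif any(tag.lower() in ['attention', 'memory', 'perception'] for tag in tags):
--         return 'neuropsychological'
--     else:
--         return 'general'
-- ===== SOURCE B (Python) =====
-- _TAG_INDEX = {
--     'personality': ('personality', 0),
--     'big5': ('personality', 0),
--     'mbti': ('personality', 0),
--     'cognitive': ('cognitive', 1),
--     'intelligence': ('cognitive', 1),
--     'iq': ('cognitive', 1),
--     'clinical': ('clinical', 2),
--     'mental_health': ('clinical', 2),
--     'depression': ('clinical', 2),
--     'anxiety': ('clinical', 2),
--     'attention': ('neuropsychological', 3),
--     'memory': ('neuropsychological', 3),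
--     'perception': ('neuropsychological', 3),
-- }
--
--
-- def _determine_test_type(test_data):
--     # Single pass over the tags: look each lowercased tag up in an inverted
--     # index (tag -> (type, priority)) and keep the best-priority hit seen.
--     best = None
--     for tag in test_data.get('metadata', {}).get('tags', []):
--         hit = _TAG_INDEX.get(tag.lower())
--         if hit is not None and (best is None or hit[1] < best[1]):
--             best = hit
--     return best[0] if best is not None else 'general'
-- ===== Notes on version B (the rewrite author's own statement) =====
-- stated objective: alternative
-- what changed: Inverts the control structure: instead of scanning the tag list once per category in a fixed if/elif chain, B makes a single pass over the tags, looking each lowercased tag up in an inverted index (tag -> (type, priority)) and keeping the minimum-priority hit in an accumulator.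
import Mathlib
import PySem

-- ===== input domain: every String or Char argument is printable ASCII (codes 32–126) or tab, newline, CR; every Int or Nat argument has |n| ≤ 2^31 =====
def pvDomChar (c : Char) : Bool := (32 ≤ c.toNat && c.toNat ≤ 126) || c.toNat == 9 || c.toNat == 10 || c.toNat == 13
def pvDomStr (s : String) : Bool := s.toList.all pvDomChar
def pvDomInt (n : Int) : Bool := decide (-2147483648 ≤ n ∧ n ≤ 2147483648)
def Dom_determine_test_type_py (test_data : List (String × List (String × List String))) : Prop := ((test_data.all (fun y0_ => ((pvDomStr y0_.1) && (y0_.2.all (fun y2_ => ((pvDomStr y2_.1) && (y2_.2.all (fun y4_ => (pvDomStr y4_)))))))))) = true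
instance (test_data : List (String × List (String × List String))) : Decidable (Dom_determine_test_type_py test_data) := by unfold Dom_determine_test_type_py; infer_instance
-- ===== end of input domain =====

-- B inverts the control structure: one pass over the tags with an inverted index
-- (tag -> (type, priority)) and a best-priority accumulator, instead of A's per-category
-- scans in an if/elif chain (objective: alternative, same cost).


-- ===== PORT A =====
def determine_test_type_py (test_data : List (String × List (String × List String))) : String :=
  let metadata : List (String × List String) := (PySem.Dict.mk test_data).getD "metadata" []
  let tags : List String := (PySem.Dict.mk metadata).getD "tags" []
  if tags.any (fun tag => (["personality", "big5", "mbti"] : List String).contains (PySem.Str.lower tag)) then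
    "personality"
  else if tags.any (fun tag => (["cognitive", "intelligence", "iq"] : List String).contains (PySem.Str.lower tag)) then
    "cognitive"
  else if tags.any (fun tag => (["clinical", "mental_health", "depression", "anxiety"] : List String).contains (PySem.Str.lower tag)) then
    "clinical"
  else if tags.any (fun tag => (["attention", "memory", "perception"] : List String).contains (PySem.Str.lower tag)) then
    "neuropsychological"
  else
    "general"

-- ===== PORT B =====
-- the inverted index _TAG_INDEX: tag -> (type name, priority)
def pvTagIndex : PySem.Dict String (String × Int) :=
  PySem.Dict.mk
    [("personality", ("personality", 0)), ("big5", ("personality", 0)), ("mbti", ("personality", 0)),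
     ("cognitive", ("cognitive", 1)), ("intelligence", ("cognitive", 1)), ("iq", ("cognitive", 1)),
     ("clinical", ("clinical", 2)), ("mental_health", ("clinical", 2)), ("depression", ("clinical", 2)),
     ("anxiety", ("clinical", 2)),
     ("attention", ("neuropsychological", 3)), ("memory", ("neuropsychological", 3)),
     ("perception", ("neuropsychological", 3))]

-- loop body: update the best-priority hit
def pvStep (best : Option (String × Int)) (tag : String) : Option (String × Int) :=
  match pvTagIndex.get? (PySem.Str.lower tag) with
  | none => best
  | some hit =>
      match best with
      | none => some hit
      | some b => if hit.2 < b.2 then some hit else best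

def determine_test_type_py_alt (test_data : List (String × List (String × List String))) : String :=
  let tags : List String :=
    (PySem.Dict.mk ((PySem.Dict.mk test_data).getD "metadata" [])).getD "tags" []
  match tags.foldl pvStep none with
  | some b => b.1
  | none => "general"

-- ===== PRECONDITION & SPEC =====
def Spec_determine_test_type_py (test_data : List (String × List (String × List String))) (out : String) : Prop := out = determine_test_type_py_alt test_data
instance (test_data : List (String × List (String × List String))) (out : String) : Decidable (Spec_determine_test_type_py test_data out) := by unfold Spec_determine_test_type_py; infer_instance

-- ===== CLAIM (what is proved, stated in full; the proofs are below) =====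
def Claim_equal_determine_test_type_py : Prop := ∀ (test_data : List (String × List (String × List String))), Dom_determine_test_type_py test_data → Spec_determine_test_type_py test_data (determine_test_type_py test_data)

-- ===== LEMMAS AND PROOFS =====

-- expected value of the accumulator as a function of the four per-category "any" bits
def pvExpected (h1 h2 h3 h4 : Bool) : Option (String × Int) :=
  if h1 then some ("personality", 0)
  else if h2 then some ("cognitive", 1)
  else if h3 then some ("clinical", 2)
  else if h4 then some ("neuropsychological", 3)
  else none

def pvIn (tag : String) (L : List String) : Bool := L.contains (PySem.Str.lower tag)

theorem pv_hit_eq (s : String) :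
    pvTagIndex.get? s
      = pvExpected ((["personality", "big5", "mbti"] : List String).contains s)
                   ((["cognitive", "intelligence", "iq"] : List String).contains s)
                   ((["clinical", "mental_health", "depression", "anxiety"] : List String).contains s)
                   ((["attention", "memory", "perception"] : List String).contains s) := by
  by_cases e1 : s = "personality"
  · subst e1; decide
  by_cases e2 : s = "big5"
  · subst e2; decide
  by_cases e3 : s = "mbti"
  · subst e3; decide
  by_cases e4 : s = "cognitive"
  · subst e4; decide
  by_cases e5 : s = "intelligence"
  · subst e5; decide
  by_cases e6 : s = "iq"
  · subst e6; decide
  by_cases e7 : s = "clinical"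
  · subst e7; decide
  by_cases e8 : s = "mental_health"
  · subst e8; decide
  by_cases e9 : s = "depression"
  · subst e9; decide
  by_cases e10 : s = "anxiety"
  · subst e10; decide
  by_cases e11 : s = "attention"
  · subst e11; decide
  by_cases e12 : s = "memory"
  · subst e12; decide
  by_cases e13 : s = "perception"
  · subst e13; decide
  simp [pvTagIndex, pvExpected, PySem.Dict.get?, e1, e2, e3, e4, e5, e6, e7, e8, e9, e10, e11, e12, e13, Ne.symm e1, Ne.symm e2, Ne.symm e3, Ne.symm e4, Ne.symm e5, Ne.symm e6, Ne.symm e7, Ne.symm e8, Ne.symm e9, Ne.symm e10, Ne.symm e11, Ne.symm e12, Ne.symm e13]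

-- one fold step on an accumulator already of pvExpected shape stays of pvExpected shape,
-- accumulating the per-tag bits with 'or' in the right priority order
theorem pv_step_expected (tag : String) (h1 h2 h3 h4 : Bool) :
    pvStep (pvExpected h1 h2 h3 h4) tag
      = pvExpected (h1 || pvIn tag ["personality", "big5", "mbti"])
                   (h2 || pvIn tag ["cognitive", "intelligence", "iq"])
                   (h3 || pvIn tag ["clinical", "mental_health", "depression", "anxiety"])
                   (h4 || pvIn tag ["attention", "memory", "perception"]) := by
  unfold pvStep
  rw [show (∀ t, pvTagIndex.get? (PySem.Str.lower t) = pvExpected (pvIn t ["personality", "big5", "mbti"]) (pvIn t ["cognitive", "intelligence", "iq"]) (pvIn t ["clinical", "mental_health", "depression", "anxiety"]) (pvIn t ["attention", "memory", "perception"])) from fun t => pv_hit_eq _]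
  cases hb1 : pvIn tag ["personality", "big5", "mbti"] <;>
  cases hb2 : pvIn tag ["cognitive", "intelligence", "iq"] <;>
  cases hb3 : pvIn tag ["clinical", "mental_health", "depression", "anxiety"] <;>
  cases hb4 : pvIn tag ["attention", "memory", "perception"] <;>
  cases h1 <;> cases h2 <;> cases h3 <;> cases h4 <;>
  decide

-- the whole fold computes pvExpected of the four 'any' bits
theorem pv_fold_expected (tags : List String) (h1 h2 h3 h4 : Bool) :
    tags.foldl pvStep (pvExpected h1 h2 h3 h4)
      = pvExpected (h1 || tags.any (fun t => pvIn t ["personality", "big5", "mbti"]))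
                   (h2 || tags.any (fun t => pvIn t ["cognitive", "intelligence", "iq"]))
                   (h3 || tags.any (fun t => pvIn t ["clinical", "mental_health", "depression", "anxiety"]))
                   (h4 || tags.any (fun t => pvIn t ["attention", "memory", "perception"])) := by
  induction tags generalizing h1 h2 h3 h4 with
  | nil => simp
  | cons t ts ih =>
      simp only [List.foldl_cons, pv_step_expected, ih, List.any_cons, Bool.or_assoc]

-- ===== VERDICT (by name: the statement is the Claim_ definition above) =====
theorem determine_test_type_py_spec : Claim_equal_determine_test_type_py := by
  intro test_data _
  unfold Spec_determine_test_type_py determine_test_type_py determine_test_type_py_alt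
  have h := pv_fold_expected
    ((PySem.Dict.mk ((PySem.Dict.mk test_data).getD "metadata" [])).getD "tags" [])
    false false false false
  simp only [Bool.false_or] at h
  rw [show (pvExpected false false false false) = none from rfl] at h
  simp only [h]
  set tags : List String := (PySem.Dict.mk ((PySem.Dict.mk test_data).getD "metadata" [])).getD "tags" []
  unfold pvExpected pvIn
  cases tags.any (fun t => (["personality", "big5", "mbti"] : List String).contains (PySem.Str.lower t)) <;>
  cases tags.any (fun t => (["cognitive", "intelligence", "iq"] : List String).contains (PySem.Str.lower t)) <;>
  cases tags.any (fun t => (["clinical", "mental_health", "depression", "anxiety"] : List String).contains (PySem.Str.lower t)) <;>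
  cases tags.any (fun t => (["attention", "memory", "perception"] : List String).contains (PySem.Str.lower t)) <;>
  simp
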